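-- pv_equiv track=rewrite | github.com/pypi-data/pypi-mirror-342 | packages/svgftw/svgftw-0.1.0-py3-none-any.whl/SVGFTW/models/svgAIVectorGen.py | _parse_path_data
-- ===== SOURCE A (Python) =====
-- from typing import Dict, Any, List, Optional, Union, Tuple
--
-- def _parse_path_data(path_data: str) -> List[str]:
--     """Split path data into subpaths."""
--     subpaths = []
--     current = []
--
--     for cmd in path_data.split():
--         if cmd.startswith('M') and current:
--             subpaths.append(current)
--             current = []
--         current.append(cmd)
--
--     if current:
--         subpaths.append(current)
--
--     return subpaths
-- ===== SOURCE B (Python) =====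
-- def _parse_path_data(path_data: str):
--     """Split path data into subpaths: recursively peel one subpath off the front."""
--     def chunks(tokens):
--         if not tokens:
--             return []
--         body, rest = span_non_m(tokens[1:])
--         return [[tokens[0]] + body] + chunks(rest)
--
--     def span_non_m(tokens):
--         if tokens and not tokens[0].startswith('M'):
--             body, rest = span_non_m(tokens[1:])
--             return [tokens[0]] + body, rest
--         return [], tokens
--
--     return chunks(path_data.split())
-- ===== Notes on version B (the rewrite author's own statement) =====
-- stated objective: alternative
-- what changed: Replaces A's single accumulator pass that flushes the running group at each M command with a recursive front-peeling decomposition: take the head token, span the following non-M tokens into one subpath, and recurse on the remainder.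
import Mathlib
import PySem

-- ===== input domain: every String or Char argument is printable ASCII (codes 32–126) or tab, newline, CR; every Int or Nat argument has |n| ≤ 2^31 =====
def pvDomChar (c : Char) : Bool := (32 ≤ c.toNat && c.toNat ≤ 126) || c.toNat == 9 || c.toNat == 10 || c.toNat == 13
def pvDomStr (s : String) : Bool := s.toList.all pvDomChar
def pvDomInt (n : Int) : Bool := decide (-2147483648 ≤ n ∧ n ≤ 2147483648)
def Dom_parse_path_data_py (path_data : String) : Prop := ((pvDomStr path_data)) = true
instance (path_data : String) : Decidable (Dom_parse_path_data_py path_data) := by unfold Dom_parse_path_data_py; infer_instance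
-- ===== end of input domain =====

-- B replaces A's flush-on-M accumulator pass with a recursive front-peeling decomposition (one subpath spanned off the front per step); same values, no speed claim.

-- ===== PORT A =====
-- one loop step of A: flush `current` when an M command arrives, then append the command
def pvStepA (st : List (List String) × List String) (cmd : String) :
    List (List String) × List String :=
  if PySem.Str.startswith cmd "M" && !st.2.isEmpty then (st.1 ++ [st.2], [cmd])
  else (st.1, st.2 ++ [cmd])

def parse_path_data_py (path_data : String) : List (List String) :=
  let st := (PySem.Str.split₀ path_data).foldl pvStepA ([], [])
  if !st.2.isEmpty then st.1 ++ [st.2] else st.1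

-- ===== PORT B =====
-- span_non_m: the longest prefix of non-M tokens, and the rest
def pvSpanNonM : List String → List String × List String
  | [] => ([], [])
  | t :: rest =>
    if !(PySem.Str.startswith t "M") then
      (t :: (pvSpanNonM rest).1, (pvSpanNonM rest).2)
    else ([], t :: rest)

theorem pvSpanNonM_len (l : List String) : (pvSpanNonM l).2.length ≤ l.length := by
  induction l with
  | nil => simp [pvSpanNonM]
  | cons t rest ih =>
    simp only [pvSpanNonM]
    split
    · simpa using Nat.le_succ_of_le ih
    · simp

-- chunks: peel one subpath off the front, recurse on the remainder
def pvChunks : List String → List (List String)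
  | [] => []
  | t :: rest =>
    (t :: (pvSpanNonM rest).1) :: pvChunks (pvSpanNonM rest).2
termination_by l => l.length
decreasing_by
  have := pvSpanNonM_len rest
  simp only [List.length_cons]
  omega

def parse_path_data_py_alt (path_data : String) : List (List String) :=
  pvChunks (PySem.Str.split₀ path_data)

-- ===== PRECONDITION & SPEC =====
def Spec_parse_path_data_py (path_data : String) (out : List (List String)) : Prop := out = parse_path_data_py_alt path_data
instance (path_data : String) (out : List (List String)) : Decidable (Spec_parse_path_data_py path_data out) := by unfold Spec_parse_path_data_py; infer_instance

-- ===== CLAIM (what is proved, stated in full; the proofs are below) =====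
def Claim_equal_parse_path_data_py : Prop := ∀ (path_data : String), Dom_parse_path_data_py path_data → Spec_parse_path_data_py path_data (parse_path_data_py path_data)

-- ===== LEMMAS AND PROOFS =====

-- finalize of A's loop state
def pvFin (st : List (List String) × List String) : List (List String) :=
  if !st.2.isEmpty then st.1 ++ [st.2] else st.1

theorem pvFoldA (ts : List String) : ∀ (sp : List (List String)) (cur : List String),
    cur ≠ [] →
    pvFin (ts.foldl pvStepA (sp, cur)) =
      sp ++ ((cur ++ (pvSpanNonM ts).1) :: pvChunks (pvSpanNonM ts).2) := by
  induction ts with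
  | nil =>
    intro sp cur hcur
    simp [pvFin, pvSpanNonM, pvChunks, hcur]
  | cons t ts ih =>
    intro sp cur hcur
    by_cases hM : PySem.Chars.startswith t.toList ['M'] = true
    · have hstep : pvStepA (sp, cur) t = (sp ++ [cur], [t]) := by
        simp [pvStepA, hM, hcur]
      rw [List.foldl_cons, hstep, ih (sp ++ [cur]) [t] (by simp)]
      simp [pvSpanNonM, hM, pvChunks]
    · have hstep : pvStepA (sp, cur) t = (sp, cur ++ [t]) := by
        simp [pvStepA, hM]
      rw [List.foldl_cons, hstep, ih sp (cur ++ [t]) (by simp)]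
      simp [pvSpanNonM, hM]
theorem pv_main (ts : List String) : pvFin (ts.foldl pvStepA ([], [])) = pvChunks ts := by
  cases ts with
  | nil => simp [pvFin, pvChunks]
  | cons t ts =>
    have hstep : pvStepA ([], []) t = ([], [t]) := by simp [pvStepA]
    rw [List.foldl_cons, hstep, pvFoldA ts [] [t] (by simp)]
    simp [pvChunks]

-- ===== VERDICT (by name: the statement is the Claim_ definition above) =====
theorem parse_path_data_py_spec : Claim_equal_parse_path_data_py := by
  intro path_data _
  show parse_path_data_py path_data = parse_path_data_py_alt path_data
  unfold parse_path_data_py parse_path_data_py_alt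
  exact pv_main _
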